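-- pv_equiv track=rewrite | github.com/haokaibo/PythonPractice | src/AlgoExpert/class_photos.py | classPhotos_optimized
-- ===== SOURCE A (Python) =====
-- def classPhotos_optimized(redShirtHeights, blueShirtHeights):
--     # Write your code here.
--     if redShirtHeights is None or blueShirtHeights is None or len(redShirtHeights) == 0 or len(blueShirtHeights) == 0:
--         return False
--
--     # Sort both arrays
--     redShirtHeights.sort()
--     blueShirtHeights.sort()
--
--     # The core logic is that ensure all the heights in either team are consistently taller or shorter
--     # If the heights are not consistent, then return false
--
--     # use a counter to keep the times when the red one is not the same as the blue one. it will not record the equal ones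
--     gap_times = 0
--     shorter_count = 0
--
--     # If the red item is taller compared to the blue one, then count +1, else -1.
--     team_size = len(blueShirtHeights)
--
--     for i in range(team_size):
--         if abs(shorter_count) < gap_times:
--             return False
--
--         if redShirtHeights[i] > blueShirtHeights[i]:
--             shorter_count -= 1
--         elif redShirtHeights[i] < blueShirtHeights[i]:
--             shorter_count += 1
--         else:
--             # the equal case will not increase any
--             return False
--
--         gap_times += 1
--
--     return gap_times == abs(shorter_count)
-- ===== SOURCE B (Python) =====
-- def classPhotos_optimized(redShirtHeights, blueShirtHeights):
--     # Equivalence is about the return value; like A, this sorts both lists in place.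
--     if redShirtHeights is None or blueShirtHeights is None or len(redShirtHeights) == 0 or len(blueShirtHeights) == 0:
--         return False
--     redShirtHeights.sort()
--     blueShirtHeights.sort()
--     n = len(blueShirtHeights)
--     all_taller = all(redShirtHeights[i] > blueShirtHeights[i] for i in range(n))
--     all_shorter = all(redShirtHeights[i] < blueShirtHeights[i] for i in range(n))
--     return all_taller or all_shorter
-- ===== Notes on version B (the rewrite author's own statement) =====
-- stated objective: simpler
-- what changed: Replaces A's single stateful pass (gap_times/shorter_count counters with mid-loop abs-comparison early exits and a final counter equation) by two stateless all() scans over the sorted lists (all taller / all shorter) combined with or.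
import Mathlib
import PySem

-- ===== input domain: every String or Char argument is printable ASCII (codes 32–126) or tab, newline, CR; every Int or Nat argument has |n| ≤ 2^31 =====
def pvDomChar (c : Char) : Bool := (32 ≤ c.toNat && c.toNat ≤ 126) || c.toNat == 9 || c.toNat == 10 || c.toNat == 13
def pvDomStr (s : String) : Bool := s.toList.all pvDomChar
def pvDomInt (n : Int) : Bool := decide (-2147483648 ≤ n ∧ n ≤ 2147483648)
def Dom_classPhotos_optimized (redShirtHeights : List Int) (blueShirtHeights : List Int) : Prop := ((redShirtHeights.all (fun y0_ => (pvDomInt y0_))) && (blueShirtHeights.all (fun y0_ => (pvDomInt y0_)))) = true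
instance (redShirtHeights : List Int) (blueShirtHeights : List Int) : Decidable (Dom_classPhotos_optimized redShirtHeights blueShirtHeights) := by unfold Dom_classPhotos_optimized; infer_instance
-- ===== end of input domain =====

-- B replaces A's stateful counter loop (gap_times/shorter_count with early exits) by two
-- stateless all() scans over the sorted lists; equivalence is about the return value
-- (both Pythons sort their arguments in place alike).

-- ===== PORT A =====
-- the for-loop of A: state (gap_times, shorter_count), one recursive call per iteration;
-- red[i]/blue[i] via pyGetD (default never observed inside Pre_, where A does not raise)
def classPhotosLoop (sr sb : List Int) : Nat → Nat → Int → Int → Bool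
  | 0, _, gt, sc => decide (gt = (sc.natAbs : Int))           -- return gap_times == abs(shorter_count)
  | fuel + 1, i, gt, sc =>
    if (sc.natAbs : Int) < gt then false                      -- if abs(shorter_count) < gap_times: return False
    else
      let r := PySem.List.pyGetD sr (i : Int) 0
      let b := PySem.List.pyGetD sb (i : Int) 0
      if r > b then classPhotosLoop sr sb fuel (i + 1) (gt + 1) (sc - 1)
      else if r < b then classPhotosLoop sr sb fuel (i + 1) (gt + 1) (sc + 1)
      else false                                              -- equal heights: return False

def classPhotos_optimized (redShirtHeights : List Int) (blueShirtHeights : List Int) : Bool :=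
  if redShirtHeights = [] ∨ blueShirtHeights = [] then false
  else
    let sr := PySem.List.sorted redShirtHeights (fun x => x) false
    let sb := PySem.List.sorted blueShirtHeights (fun x => x) false
    classPhotosLoop sr sb sb.length 0 0 0

-- ===== PORT B =====
def classPhotos_optimized_alt (redShirtHeights : List Int) (blueShirtHeights : List Int) : Bool :=
  if redShirtHeights = [] ∨ blueShirtHeights = [] then false
  else
    let sr := PySem.List.sorted redShirtHeights (fun x => x) false
    let sb := PySem.List.sorted blueShirtHeights (fun x => x) false
    let n := sb.length
    let allTaller := (List.range n).all (fun i => decide (PySem.List.pyGetD sr (i : Int) 0 > PySem.List.pyGetD sb (i : Int) 0))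
    let allShorter := (List.range n).all (fun i => decide (PySem.List.pyGetD sr (i : Int) 0 < PySem.List.pyGetD sb (i : Int) 0))
    allTaller || allShorter

-- ===== PRECONDITION & SPEC =====
-- Pre_ excludes exactly the inputs on which A raises IndexError: red strictly shorter than
-- blue while, after sorting, one team strictly dominates the other on every index of red
-- (only then does A's loop survive past red's last index).  B raises there too.
def Pre_classPhotos_optimized (redShirtHeights : List Int) (blueShirtHeights : List Int) : Prop :=
  blueShirtHeights.length ≤ redShirtHeights.length ∨ redShirtHeights = [] ∨
    ¬ ((∀ i < redShirtHeights.length,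
          (PySem.List.sorted blueShirtHeights (fun x => x) false).getD i 0 <
          (PySem.List.sorted redShirtHeights (fun x => x) false).getD i 0) ∨
       (∀ i < redShirtHeights.length,
          (PySem.List.sorted redShirtHeights (fun x => x) false).getD i 0 <
          (PySem.List.sorted blueShirtHeights (fun x => x) false).getD i 0))
instance (redShirtHeights : List Int) (blueShirtHeights : List Int) : Decidable (Pre_classPhotos_optimized redShirtHeights blueShirtHeights) := by unfold Pre_classPhotos_optimized; infer_instance

def pvWitness_classPhotos_optimized : List Int × List Int := ([5, 8, 1], [6, 9, 2])

def Spec_classPhotos_optimized (redShirtHeights : List Int) (blueShirtHeights : List Int) (out : Bool) : Prop := out = classPhotos_optimized_alt redShirtHeights blueShirtHeights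
instance (redShirtHeights : List Int) (blueShirtHeights : List Int) (out : Bool) : Decidable (Spec_classPhotos_optimized redShirtHeights blueShirtHeights out) := by unfold Spec_classPhotos_optimized; infer_instance

-- ===== CLAIM (what is proved, stated in full; the proofs are below) =====
def Claim_equal_classPhotos_optimized : Prop := ∀ (redShirtHeights : List Int) (blueShirtHeights : List Int), Dom_classPhotos_optimized redShirtHeights blueShirtHeights → Pre_classPhotos_optimized redShirtHeights blueShirtHeights → Spec_classPhotos_optimized redShirtHeights blueShirtHeights (classPhotos_optimized redShirtHeights blueShirtHeights)

-- ===== LEMMAS AND PROOFS =====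

-- once |shorter_count| < gap_times, A returns false whatever remains
theorem classPhotosLoop_false (sr sb : List Int) (fuel i : Nat) (gt sc : Int)
    (h : (sc.natAbs : Int) < gt) : classPhotosLoop sr sb fuel i gt sc = false := by
  cases fuel with
  | zero =>
    simp only [classPhotosLoop, decide_eq_false_iff_not]
    omega
  | succ f =>
    simp only [classPhotosLoop]
    rw [if_pos h]

-- consistently-shorter state (gt = sc = k ≥ 1): the rest of the loop is an all(<) scan
theorem classPhotosLoop_shorter (sr sb : List Int) (fuel : Nat) :
    ∀ (i : Nat) (k : Int), 1 ≤ k →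
    classPhotosLoop sr sb fuel i k k =
      (List.range' i fuel).all (fun j => decide (PySem.List.pyGetD sr (j : Int) 0 < PySem.List.pyGetD sb (j : Int) 0)) := by
  induction fuel with
  | zero =>
    intro i k hk
    simp only [classPhotosLoop, List.range'_zero, List.all_nil, decide_eq_true_iff]
    omega
  | succ f ih =>
    intro i k hk
    rw [List.range'_succ]
    simp only [classPhotosLoop, List.all_cons]
    rw [if_neg (by omega : ¬ ((k.natAbs : Int) < k))]
    by_cases hgt : PySem.List.pyGetD sr (i : Int) 0 > PySem.List.pyGetD sb (i : Int) 0
    · rw [if_pos hgt, classPhotosLoop_false sr sb f (i + 1) (k + 1) (k - 1) (by omega)]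
      rw [decide_eq_false (by omega : ¬ (PySem.List.pyGetD sr (i : Int) 0 < PySem.List.pyGetD sb (i : Int) 0)), Bool.false_and]
    · rw [if_neg hgt]
      by_cases hltc : PySem.List.pyGetD sr (i : Int) 0 < PySem.List.pyGetD sb (i : Int) 0
      · rw [if_pos hltc, ih (i + 1) (k + 1) (by omega), decide_eq_true hltc, Bool.true_and]
      · rw [if_neg hltc, decide_eq_false hltc, Bool.false_and]

-- consistently-taller state (gt = k ≥ 1, sc = -k): the rest of the loop is an all(>) scan
theorem classPhotosLoop_taller (sr sb : List Int) (fuel : Nat) :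
    ∀ (i : Nat) (k : Int), 1 ≤ k →
    classPhotosLoop sr sb fuel i k (-k) =
      (List.range' i fuel).all (fun j => decide (PySem.List.pyGetD sr (j : Int) 0 > PySem.List.pyGetD sb (j : Int) 0)) := by
  induction fuel with
  | zero =>
    intro i k hk
    simp only [classPhotosLoop, List.range'_zero, List.all_nil, decide_eq_true_iff]
    omega
  | succ f ih =>
    intro i k hk
    rw [List.range'_succ]
    simp only [classPhotosLoop, List.all_cons]
    rw [if_neg (by omega : ¬ (((-k).natAbs : Int) < k))]
    by_cases hgt : PySem.List.pyGetD sr (i : Int) 0 > PySem.List.pyGetD sb (i : Int) 0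
    · rw [if_pos hgt]
      rw [(by ring : -k - 1 = -(k + 1)), ih (i + 1) (k + 1) (by omega)]
      rw [decide_eq_true hgt, Bool.true_and]
    · rw [if_neg hgt]
      by_cases hltc : PySem.List.pyGetD sr (i : Int) 0 < PySem.List.pyGetD sb (i : Int) 0
      · rw [if_pos hltc, classPhotosLoop_false sr sb f (i + 1) (k + 1) (-k + 1) (by omega)]
        rw [decide_eq_false hgt, Bool.false_and]
      · rw [if_neg hltc, decide_eq_false hgt, Bool.false_and]

-- the full loop from the initial state computes all(>) || all(<)
theorem classPhotosLoop_start (sr sb : List Int) (n : Nat) :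
    classPhotosLoop sr sb n 0 0 0 =
      ((List.range n).all (fun i => decide (PySem.List.pyGetD sr (i : Int) 0 > PySem.List.pyGetD sb (i : Int) 0)) ||
       (List.range n).all (fun i => decide (PySem.List.pyGetD sr (i : Int) 0 < PySem.List.pyGetD sb (i : Int) 0))) := by
  rw [List.range_eq_range']
  cases n with
  | zero => simp [classPhotosLoop]
  | succ m =>
    rw [List.range'_succ]
    simp only [classPhotosLoop, List.all_cons, zero_add]
    rw [if_neg (by omega : ¬ ((((0 : Int)).natAbs : Int) < 0))]
    by_cases hgt : PySem.List.pyGetD sr ((0 : Nat) : Int) 0 > PySem.List.pyGetD sb ((0 : Nat) : Int) 0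
    · rw [if_pos hgt]
      rw [(by ring : (0 : Int) - 1 = -1), (by norm_num : (-1 : Int) = -(1 : Int))]
      rw [classPhotosLoop_taller sr sb m 1 1 (by omega)]
      rw [decide_eq_true hgt, Bool.true_and,
          decide_eq_false (by omega : ¬ (PySem.List.pyGetD sr ((0 : Nat) : Int) 0 < PySem.List.pyGetD sb ((0 : Nat) : Int) 0)), Bool.false_and,
          Bool.or_false]
    · rw [if_neg hgt]
      by_cases hltc : PySem.List.pyGetD sr ((0 : Nat) : Int) 0 < PySem.List.pyGetD sb ((0 : Nat) : Int) 0
      · rw [if_pos hltc, classPhotosLoop_shorter sr sb m 1 1 (by omega)]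
        rw [decide_eq_true hltc, Bool.true_and, decide_eq_false hgt, Bool.false_and, Bool.false_or]
      · rw [if_neg hltc, decide_eq_false hgt, decide_eq_false hltc, Bool.false_and, Bool.false_and, Bool.or_self]

-- ===== VERDICT (by name: the statement is the Claim_ definition above) =====
theorem classPhotos_optimized_spec : Claim_equal_classPhotos_optimized := by
  intro r b _ _
  unfold Spec_classPhotos_optimized classPhotos_optimized classPhotos_optimized_alt
  by_cases h : r = [] ∨ b = []
  · simp [h]
  · rw [if_neg h, if_neg h]
    exact classPhotosLoop_start _ _ _
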